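-- pv_equiv track=rewrite | github.com/greengreengreen/data_structure_n_algos | next_greater/next_greater.py | v5_brute_force
-- ===== SOURCE A (Python) =====
-- def v5_brute_force(A):
--     n = len(A)
--     res = [-1] * n
--     for i in range(n):
--         j = i + 1
--         while j < n and A[j] > A[i]:
--             res[i] = j
--             j += 1
--     return res
-- ===== SOURCE B (Python) =====
-- def v5_brute_force(A):
--     # Right-to-left pass computing nse[i] = first index j > i with A[j] <= A[i]
--     # (n if none), jumping via already-computed nse entries instead of rescanning;
--     # res then falls out of nse by a comprehension.
--     n = len(A)
--     nse = [n] * n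
--     for i in range(n - 1, -1, -1):
--         j = i + 1
--         while j < n and A[j] > A[i]:
--             j = nse[j]
--         nse[i] = j
--     return [j - 1 if j - 1 > i else -1 for i, j in enumerate(nse)]
-- ===== Notes on version B (the rewrite author's own statement) =====
-- stated objective: faster
-- what changed: Replaced the per-index linear rescan with a right-to-left pass that memoizes each index's next smaller-or-equal position (nse) and jumps along it, making the search amortized linear.
import Mathlib
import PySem

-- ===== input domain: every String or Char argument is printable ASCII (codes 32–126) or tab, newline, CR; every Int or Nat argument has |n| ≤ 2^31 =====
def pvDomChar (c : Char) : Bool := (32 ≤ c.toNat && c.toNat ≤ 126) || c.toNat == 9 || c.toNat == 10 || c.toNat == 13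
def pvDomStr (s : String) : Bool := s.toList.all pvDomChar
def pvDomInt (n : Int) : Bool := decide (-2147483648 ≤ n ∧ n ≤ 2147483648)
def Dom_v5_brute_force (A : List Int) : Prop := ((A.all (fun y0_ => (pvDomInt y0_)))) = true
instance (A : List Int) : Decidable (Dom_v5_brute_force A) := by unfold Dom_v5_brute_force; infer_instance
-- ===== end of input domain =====

-- B replaces A's per-index linear rescans by a right-to-left pass that memoizes each
-- index's next smaller-or-equal position and jumps along it; same return value.

-- ===== PORT A =====
-- inner `while j < n and A[j] > A[i]: res[i] = j; j += 1`, carrying res[i] as cur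
-- (loop indices are nonnegative, so j is a Nat; the stored value is an Int)
def v5whileA (A : List Int) (x : Int) (j : Nat) (cur : Int) : Int :=
  if h : j < A.length then
    if x < A[j] then v5whileA A x (j + 1) (j : Int) else cur
  else cur
termination_by A.length - j

-- `res = [-1]*n` then `for i in range(n)`: iteration i overwrites res[i]
def v5_brute_force (A : List Int) : List Int :=
  (List.range A.length).foldl
    (fun res i => res.set i (v5whileA A (A.getD i 0) (i + 1) (-1)))
    (List.replicate A.length (-1))

-- ===== PORT B =====
-- inner `while j < n and A[j] > A[i]: j = nse[j]`; each jump increases j, so the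
-- fuel `n + 1` is only a totality guard and is never exhausted
def v5jump (A : List Int) (nse : List Nat) (x : Int) (j : Nat) (fuel : Nat) : Nat :=
  match fuel with
  | 0 => j
  | f + 1 =>
    if h : j < A.length then
      if x < A[j] then v5jump A nse x (nse.getD j 0) f else j
    else j

-- `for i in range(n-1, -1, -1)`: processes indices i-1, i-2, …, 0, filling nse
def v5loopB (A : List Int) (i : Nat) (nse : List Nat) : List Nat :=
  match i with
  | 0 => nse
  | i' + 1 => v5loopB A i' (nse.set i' (v5jump A nse (A.getD i' 0) (i' + 1) (A.length + 1)))

-- `[j - 1 if j - 1 > i else -1 for i, j in enumerate(nse)]`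
def v5_brute_force_alt (A : List Int) : List Int :=
  (PySem.List.enumerate (v5loopB A A.length (List.replicate A.length A.length))).map
    (fun p => if (p.2 : Int) - 1 > p.1 then (p.2 : Int) - 1 else -1)

-- ===== PRECONDITION & SPEC =====
def Spec_v5_brute_force (A : List Int) (out : List Int) : Prop := out = v5_brute_force_alt A
instance (A : List Int) (out : List Int) : Decidable (Spec_v5_brute_force A out) := by unfold Spec_v5_brute_force; infer_instance

-- ===== CLAIM (what is proved, stated in full; the proofs are below) =====
def Claim_equal_v5_brute_force : Prop := ∀ (A : List Int), Dom_v5_brute_force A → Spec_v5_brute_force A (v5_brute_force A)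

-- ===== LEMMAS AND PROOFS =====

-- first index k ≥ j with A[k] ≤ x, or A.length if there is none
def firstLE (A : List Int) (x : Int) (j : Nat) : Nat :=
  if h : j < A.length then
    if A[j] ≤ x then j else firstLE A x (j + 1)
  else A.length
termination_by A.length - j

-- the common value of res[i] in both programs
def resVal (A : List Int) (i : Nat) : Int :=
  if firstLE A (A.getD i 0) (i + 1) = i + 1 then -1
  else (firstLE A (A.getD i 0) (i + 1) : Int) - 1

theorem firstLE_ge (A : List Int) (x : Int) (j : Nat) : j ≤ A.length → j ≤ firstLE A x j := by
  fun_induction firstLE with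
  | case1 => omega
  | case2 j h hle ih => intro _; have := ih (by omega); omega
  | case3 => omega

theorem firstLE_le (A : List Int) (x : Int) (j : Nat) : firstLE A x j ≤ A.length := by
  fun_induction firstLE <;> omega

theorem firstLE_gt (A : List Int) (x : Int) (j : Nat) :
    ∀ k, j ≤ k → k < firstLE A x j → x < A.getD k 0 := by
  fun_induction firstLE with
  | case1 j h hle => omega
  | case2 j h hle ih =>
    intro k hk hk'
    rcases Nat.eq_or_lt_of_le hk with rfl | h2
    · rw [List.getD_eq_getElem _ _ h]; omega
    · exact ih k h2 hk'
  | case3 j h => intro k hk hk'; omega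

theorem firstLE_skip (A : List Int) (x : Int) (a b : Nat)
    (hab : a ≤ b) (hb : b ≤ A.length)
    (h : ∀ k, a ≤ k → k < b → x < A.getD k 0) :
    firstLE A x a = firstLE A x b := by
  induction b with
  | zero =>
    have : a = 0 := by omega
    subst this; rfl
  | succ b ih =>
    rcases Nat.eq_or_lt_of_le hab with rfl | h2
    · rfl
    · have hb' : b < A.length := by omega
      have : firstLE A x b = firstLE A x (b+1) := by
        rw [firstLE]
        have hx : x < A[b] := by
          have := h b (by omega) (by omega)
          rwa [List.getD_eq_getElem _ _ hb'] at this
        simp [hb', not_le.mpr hx]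
      rw [← this, ih (by omega) (by omega) (fun k hk hk' => h k hk (by omega))]

theorem v5whileA_eq (A : List Int) (x : Int) (j : Nat) (cur : Int) (hj : j ≤ A.length) :
    v5whileA A x j cur = if firstLE A x j = j then cur else (firstLE A x j : Int) - 1 := by
  fun_induction v5whileA with
  | case1 j cur h hx ih =>
    have h1 : firstLE A x j = firstLE A x (j+1) := by
      rw [firstLE]; simp [h, not_le.mpr hx]
    have h2 := firstLE_ge A x (j+1) (by omega)
    rw [ih (by omega), h1]
    rcases Nat.eq_or_lt_of_le h2 with h3 | h3
    · rw [if_pos h3.symm, if_neg (by omega)]; omega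
    · have : firstLE A x (j+1) ≠ j + 1 := by omega
      have : firstLE A x (j+1) ≠ j := by omega
      simp_all
  | case2 j cur h hx =>
    have : firstLE A x j = j := by rw [firstLE]; simp [h, not_lt.mp hx]
    simp [this]
  | case3 j cur h =>
    have hj' : j = A.length := by omega
    have : firstLE A x j = j := by rw [firstLE]; simp [hj']
    simp [this]

theorem v5jump_eq (A : List Int) (nse : List Nat) (x : Int) :
    ∀ fuel j, j ≤ A.length → A.length - j < fuel →
    (∀ k, j ≤ k → k < A.length → nse.getD k 0 = firstLE A (A.getD k 0) (k + 1)) →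
    v5jump A nse x j fuel = firstLE A x j := by
  intro fuel
  induction fuel with
  | zero => omega
  | succ f ih =>
    intro j hj hf hn
    rw [v5jump]
    by_cases h : j < A.length
    · simp only [h, dif_pos]
      by_cases hx : x < A[j]
      · simp only [hx, if_pos]
        have hnj := hn j (le_refl j) h
        set b := firstLE A (A.getD j 0) (j + 1) with hb
        have hb1 : j + 1 ≤ b := firstLE_ge A _ (j+1) (by omega)
        have hb2 : b ≤ A.length := firstLE_le A _ (j+1)
        have hgt : ∀ k, j + 1 ≤ k → k < b → A.getD j 0 < A.getD k 0 := firstLE_gt A _ (j+1)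
        have hAj : A.getD j 0 = A[j] := List.getD_eq_getElem _ _ h
        have hskip : firstLE A x j = firstLE A x b := by
          have e1 : firstLE A x j = firstLE A x (j+1) := by
            rw [firstLE]; simp [h, not_le.mpr hx]
          rw [e1]
          exact firstLE_skip A x (j+1) b hb1 hb2
            (fun k hk hk' => lt_trans (show x < A.getD j 0 by rw [hAj]; exact hx) (hgt k hk hk'))
        rw [hnj, ih b (by omega) (by omega) (fun k hk hk' => hn k (by omega) hk'), ← hskip]
      · rw [if_neg hx]
        rw [firstLE]; simp [h, not_lt.mp hx]
    · rw [dif_neg h]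
      have : j = A.length := by omega
      rw [firstLE]; simp [this]

theorem getD_set_self {α : Type} [Inhabited α] (l : List α) (i : Nat) (v d : α) (h : i < l.length) :
    (l.set i v).getD i d = v := by
  simp [List.getD_eq_getElem?_getD, h]

theorem getD_set_ne {α : Type} [Inhabited α] (l : List α) (i k : Nat) (v d : α) (h : i ≠ k) :
    (l.set i v).getD k d = l.getD k d := by
  simp [List.getD_eq_getElem?_getD, h]

theorem v5loopB_eq (A : List Int) :
    ∀ i nse, i ≤ A.length → nse.length = A.length →
    (∀ k, i ≤ k → k < A.length → nse.getD k 0 = firstLE A (A.getD k 0) (k + 1)) →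
    (v5loopB A i nse).length = A.length ∧
    (∀ k, k < A.length → (v5loopB A i nse).getD k 0 = firstLE A (A.getD k 0) (k + 1)) := by
  intro i
  induction i with
  | zero =>
    intro nse _ hnse hhi
    exact ⟨by rw [v5loopB, hnse], fun k hk => hhi k (Nat.zero_le k) hk⟩
  | succ i' ih =>
    intro nse hi hnse hhi
    rw [v5loopB]
    have hi' : i' < A.length := by omega
    have hj : v5jump A nse (A.getD i' 0) (i' + 1) (A.length + 1) =
        firstLE A (A.getD i' 0) (i' + 1) :=
      v5jump_eq A nse _ (A.length + 1) (i' + 1) (by omega) (by omega)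
        (fun k hk hk' => hhi k (by omega) hk')
    rw [hj]
    apply ih
    · omega
    · simp [hnse]
    · intro k hk hk'
      rcases Nat.eq_or_lt_of_le hk with rfl | h2
      · rw [getD_set_self _ _ _ _ (by omega)]
      · rw [getD_set_ne _ _ _ _ _ (by omega)]
        exact hhi k (by omega) hk'

theorem length_foldl_set (f : Nat → Int) :
    ∀ (l : List Nat) (r : List Int), (l.foldl (fun r i => r.set i (f i)) r).length = r.length := by
  intro l
  induction l with
  | nil => intro r; rfl
  | cons a l ih => intro r; rw [List.foldl_cons, ih, List.length_set]

theorem foldl_set_range (f : Nat → Int) (r0 : List Int) :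
    ∀ (m k : Nat), k < r0.length →
    ((List.range m).foldl (fun r i => r.set i (f i)) r0).getD k 0 =
      if k < m then f k else r0.getD k 0 := by
  intro m
  induction m with
  | zero => intro k hk; simp
  | succ m ih =>
    intro k hk
    rw [List.range_succ, List.foldl_append, List.foldl_cons, List.foldl_nil]
    by_cases h : k = m
    · subst h
      rw [getD_set_self _ _ _ _ (by rw [length_foldl_set]; omega), if_pos (by omega)]
    · rw [getD_set_ne _ _ _ _ _ (fun e => h e.symm), ih k hk]
      by_cases h2 : k < m
      · rw [if_pos h2, if_pos (by omega)]
      · rw [if_neg h2, if_neg (by omega)]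

theorem v5A_eq (A : List Int) :
    (v5_brute_force A).length = A.length ∧
    (∀ k, k < A.length → (v5_brute_force A).getD k 0 = resVal A k) := by
  constructor
  · rw [v5_brute_force, length_foldl_set, List.length_replicate]
  · intro k hk
    rw [v5_brute_force, foldl_set_range _ _ _ k (by simp [hk]), if_pos hk,
      v5whileA_eq A _ (k+1) (-1) (by omega), resVal]

-- ===== VERDICT (by name: the statement is the Claim_ definition above) =====
theorem v5_brute_force_spec : Claim_equal_v5_brute_force := by
  intro A _
  unfold Spec_v5_brute_force
  obtain ⟨hla, hva⟩ := v5A_eq A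
  obtain ⟨hlb, hvb⟩ := v5loopB_eq A A.length (List.replicate A.length A.length)
    le_rfl (by simp) (fun k hk hk' => absurd hk' (by omega))
  rw [v5_brute_force_alt]
  apply List.ext_getElem
    (by rw [hla, List.length_map, PySem.List.length_enumerate, hlb])
  intro i h1 h2
  have hi : i < A.length := by rwa [hla] at h1
  have hi2 : i < (v5loopB A A.length (List.replicate A.length A.length)).length := by
    rw [hlb]; exact hi
  rw [← List.getD_eq_getElem _ 0 h1, hva i hi, List.getElem_map,
    PySem.List.getElem_enumerate, ← List.getD_eq_getElem _ 0 hi2, hvb i hi, resVal]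
  have hF1 := firstLE_ge A (A.getD i 0) (i + 1) (by omega)
  split <;> split
  all_goals simp_all
  all_goals omega
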